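-- pv_equiv track=rewrite | github.com/anushreeberlia/loom | services/outfit.py | get_color_family
-- ===== SOURCE A (Python) =====
-- COLOR_FAMILIES = {
--     "warm": {"red", "orange", "yellow", "brown", "beige", "coral", "rust", "burgundy"},
--     "cool": {"blue", "green", "purple", "navy", "teal", "mint", "lavender"},
--     "neutral": {"black", "white", "gray", "beige", "navy", "metallic", "brown"},
-- }
--
-- def get_color_family(color: str) -> str:
--     """Get the color family (warm/cool/neutral) for a color."""
--     if not color:
--         return "neutral"
--
--     color_lower = color.lower()
--
--     for family, colors in COLOR_FAMILIES.items():
--         if color_lower in colors: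
--             return family
--
--     return "neutral"  # Unknown colors default to neutral
-- ===== SOURCE B (Python) =====
-- COLOR_FAMILIES = {
--     "warm": {"red", "orange", "yellow", "brown", "beige", "coral", "rust", "burgundy"},
--     "cool": {"blue", "green", "purple", "navy", "teal", "mint", "lavender"},
--     "neutral": {"black", "white", "gray", "beige", "navy", "metallic", "brown"},
-- }
--
-- # Reverse index built once: color -> family, first family in warm/cool/neutral order wins.
-- _COLOR_TO_FAMILY = {}
-- for _family, _colors in COLOR_FAMILIES.items():
--     for _c in _colors:
--         _COLOR_TO_FAMILY.setdefault(_c, _family)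
--
--
-- def get_color_family(color: str) -> str:
--     """Get the color family (warm/cool/neutral) for a color."""
--     if not color:
--         return "neutral"
--     return _COLOR_TO_FAMILY.get(color.lower(), "neutral")
-- ===== Notes on version B (the rewrite author's own statement) =====
-- stated objective: idiomatic
-- what changed: B precomputes a reverse color->family dict once at module load (first family in warm/cool/neutral order wins via setdefault) and answers each query with a single dict lookup, replacing A's per-call scan over the family sets.
import Mathlib
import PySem

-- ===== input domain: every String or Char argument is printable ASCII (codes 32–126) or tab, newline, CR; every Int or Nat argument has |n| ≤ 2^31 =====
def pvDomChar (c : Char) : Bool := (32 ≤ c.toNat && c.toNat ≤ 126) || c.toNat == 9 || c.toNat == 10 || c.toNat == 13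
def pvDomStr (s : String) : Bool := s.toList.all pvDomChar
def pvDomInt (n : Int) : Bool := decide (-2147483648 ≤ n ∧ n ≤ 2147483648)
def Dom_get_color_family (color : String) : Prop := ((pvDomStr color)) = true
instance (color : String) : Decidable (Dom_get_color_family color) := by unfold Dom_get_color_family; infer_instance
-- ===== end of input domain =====

-- B replaces A's per-call scan over the family sets by one precomputed reverse
-- color→family dict looked up once per call (idiomatic; same results).

-- shared module-level constant COLOR_FAMILIES (set literals in source order)
def pvFamilies : List (String × List String) :=
  [("warm", ["red", "orange", "yellow", "brown", "beige", "coral", "rust", "burgundy"]),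
   ("cool", ["blue", "green", "purple", "navy", "teal", "mint", "lavender"]),
   ("neutral", ["black", "white", "gray", "beige", "navy", "metallic", "brown"])]

-- ===== PORT A =====
-- the 'for family, colors in COLOR_FAMILIES.items()' loop
def pvScan (cl : String) : List (String × List String) → String
  | [] => "neutral"
  | (family, colors) :: rest => if colors.contains cl then family else pvScan cl rest

def get_color_family (color : String) : String :=
  if color = "" then "neutral"
  else pvScan (PySem.Str.lower color) pvFamilies

-- ===== PORT B =====
-- module-level reverse index: for each family, setdefault every color
def pvColorToFamily : PySem.Dict String String :=
  pvFamilies.foldl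
    (fun d fc => fc.2.foldl (fun d c => d.setdefault c fc.1) d)
    PySem.Dict.empty

def get_color_family_alt (color : String) : String :=
  if color = "" then "neutral"
  else pvColorToFamily.getD (PySem.Str.lower color) "neutral"

-- ===== PRECONDITION & SPEC =====
def Spec_get_color_family (color : String) (out : String) : Prop := out = get_color_family_alt color
instance (color : String) (out : String) : Decidable (Spec_get_color_family color out) := by unfold Spec_get_color_family; infer_instance

-- ===== CLAIM (what is proved, stated in full; the proofs are below) =====
def Claim_equal_get_color_family : Prop := ∀ (color : String), Dom_get_color_family color → Spec_get_color_family color (get_color_family color)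

-- ===== LEMMAS AND PROOFS =====
set_option maxRecDepth 8192 in
lemma pvScan_eq_getD (cl : String) :
    pvScan cl pvFamilies = pvColorToFamily.getD cl "neutral" := by
  by_cases h0 : cl = "red"
  · subst h0; decide
  by_cases h1 : cl = "orange"
  · subst h1; decide
  by_cases h2 : cl = "yellow"
  · subst h2; decide
  by_cases h3 : cl = "brown"
  · subst h3; decide
  by_cases h4 : cl = "beige"
  · subst h4; decide
  by_cases h5 : cl = "coral"
  · subst h5; decide
  by_cases h6 : cl = "rust"
  · subst h6; decide
  by_cases h7 : cl = "burgundy"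
  · subst h7; decide
  by_cases h8 : cl = "blue"
  · subst h8; decide
  by_cases h9 : cl = "green"
  · subst h9; decide
  by_cases h10 : cl = "purple"
  · subst h10; decide
  by_cases h11 : cl = "navy"
  · subst h11; decide
  by_cases h12 : cl = "teal"
  · subst h12; decide
  by_cases h13 : cl = "mint"
  · subst h13; decide
  by_cases h14 : cl = "lavender"
  · subst h14; decide
  by_cases h15 : cl = "black"
  · subst h15; decide
  by_cases h16 : cl = "white"
  · subst h16; decide
  by_cases h17 : cl = "gray"
  · subst h17; decide
  by_cases h18 : cl = "metallic"
  · subst h18; decide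
  have hd : pvColorToFamily = PySem.Dict.mk [("red", "warm"), ("orange", "warm"), ("yellow", "warm"), ("brown", "warm"), ("beige", "warm"), ("coral", "warm"), ("rust", "warm"), ("burgundy", "warm"), ("blue", "cool"), ("green", "cool"), ("purple", "cool"), ("navy", "cool"), ("teal", "cool"), ("mint", "cool"), ("lavender", "cool"), ("black", "neutral"), ("white", "neutral"), ("gray", "neutral"), ("metallic", "neutral")] := by rfl
  rw [hd]
  have g0 : ¬"red" = cl := fun h => h0 h.symm
  have g1 : ¬"orange" = cl := fun h => h1 h.symm
  have g2 : ¬"yellow" = cl := fun h => h2 h.symm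
  have g3 : ¬"brown" = cl := fun h => h3 h.symm
  have g4 : ¬"beige" = cl := fun h => h4 h.symm
  have g5 : ¬"coral" = cl := fun h => h5 h.symm
  have g6 : ¬"rust" = cl := fun h => h6 h.symm
  have g7 : ¬"burgundy" = cl := fun h => h7 h.symm
  have g8 : ¬"blue" = cl := fun h => h8 h.symm
  have g9 : ¬"green" = cl := fun h => h9 h.symm
  have g10 : ¬"purple" = cl := fun h => h10 h.symm
  have g11 : ¬"navy" = cl := fun h => h11 h.symm
  have g12 : ¬"teal" = cl := fun h => h12 h.symm
  have g13 : ¬"mint" = cl := fun h => h13 h.symm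
  have g14 : ¬"lavender" = cl := fun h => h14 h.symm
  have g15 : ¬"black" = cl := fun h => h15 h.symm
  have g16 : ¬"white" = cl := fun h => h16 h.symm
  have g17 : ¬"gray" = cl := fun h => h17 h.symm
  have g18 : ¬"metallic" = cl := fun h => h18 h.symm
  simp [pvScan, pvFamilies, PySem.Dict.getD, PySem.Dict.get?, h0, h1, h2, h3, h4, h5, h6, h7, h8, h9, h10, h11, h12, h13, h14, h15, h16, h17, h18, g0, g1, g2, g3, g4, g5, g6, g7, g8, g9, g10, g11, g12, g13, g14, g15, g16, g17, g18]

-- ===== VERDICT (by name: the statement is the Claim_ definition above) =====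
theorem get_color_family_spec : Claim_equal_get_color_family := by
  intro color _
  unfold Spec_get_color_family get_color_family get_color_family_alt
  by_cases h : color = "" <;> simp [h, pvScan_eq_getD]
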